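-- pv_equiv track=rewrite | github.com/shivani-s0987/SkillForge | contest/services.py | _compute_rank_map
-- ===== SOURCE A (Python) =====
-- def _compute_rank_map(participant_score_map: dict):
--     """Compute tie-aware rank map from a dict of {user_id: score}."""
--     sorted_scores = sorted(participant_score_map.items(), key=lambda x: x[1], reverse=True)
--     rank_map = {}
--     prev_score = None
--     rank = 0
--     position = 0
--     for user_id, score in sorted_scores:
--         position += 1
--         if score != prev_score:
--             rank = position
--             prev_score = score
--         rank_map[user_id] = rank
--     return rank_map
-- ===== SOURCE B (Python) =====
-- def _compute_rank_map(participant_score_map: dict):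
--     """Compute tie-aware rank map from a dict of {user_id: score}."""
--     # 1. frequency table of scores
--     counts = {}
--     for score in participant_score_map.values():
--         counts[score] = counts.get(score, 0) + 1
--     # 2. walk the distinct scores in descending order; a score's rank is the
--     #    cumulative number of participants with a strictly higher score, plus one
--     score_rank = {}
--     position = 1
--     for score in sorted(counts, reverse=True):
--         score_rank[score] = position
--         position += counts[score]
--     # 3. fan each score's rank out to its participants, in descending order
--     ordered = sorted(participant_score_map.items(), key=lambda x: x[1], reverse=True)
--     return {user_id: score_rank[score] for user_id, score in ordered}
-- ===== Notes on version B (the rewrite author's own statement) =====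
-- stated objective: alternative
-- what changed: Replaces A's single incremental pass with prev_score/rank/position state by a three-stage algorithm: build a frequency table of scores, walk the distinct scores in descending order accumulating a cumulative position so each score's rank is 1 + the number of participants with strictly higher scores, then fan the score-to-rank table out over the descending-sorted participants.
import Mathlib
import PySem

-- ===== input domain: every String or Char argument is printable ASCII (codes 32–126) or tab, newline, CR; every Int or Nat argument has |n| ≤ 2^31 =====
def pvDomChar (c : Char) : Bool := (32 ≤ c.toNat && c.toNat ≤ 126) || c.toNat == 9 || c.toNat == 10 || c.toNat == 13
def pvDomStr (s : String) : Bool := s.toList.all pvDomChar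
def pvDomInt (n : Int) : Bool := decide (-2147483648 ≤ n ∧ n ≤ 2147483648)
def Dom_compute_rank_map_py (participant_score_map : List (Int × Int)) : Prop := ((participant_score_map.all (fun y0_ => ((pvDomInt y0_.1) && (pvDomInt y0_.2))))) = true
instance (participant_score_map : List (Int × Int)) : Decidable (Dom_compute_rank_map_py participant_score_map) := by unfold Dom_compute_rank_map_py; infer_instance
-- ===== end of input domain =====

-- B replaces A's incremental prev/rank/position scan by three stages: a frequency table of
-- scores, a cumulative-position walk over the distinct scores in descending order producing a
-- score -> rank table, and a fan-out of that table over the descending-sorted participants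
-- (objective: alternative decomposition, same O(n log n) cost).


-- ===== PORT A =====
-- loop body of A: state = (rank_map, prev_score, rank, position)
def rankStepA (st : PySem.Dict Int Int × Option Int × Int × Int) (p : Int × Int) :
    PySem.Dict Int Int × Option Int × Int × Int :=
  let position := st.2.2.2 + 1
  if some p.2 ≠ st.2.1 then
    (st.1.insert p.1 position, some p.2, position, position)
  else
    (st.1.insert p.1 st.2.2.1, st.2.1, st.2.2.1, position)

def compute_rank_map_py (participant_score_map : List (Int × Int)) : List (Int × Int) :=
  let sorted_scores := PySem.List.sorted participant_score_map (fun x => x.2) true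
  (sorted_scores.foldl rankStepA (PySem.Dict.empty, none, 0, 0)).1.items

-- ===== PORT B =====
def compute_rank_map_py_alt (participant_score_map : List (Int × Int)) : List (Int × Int) :=
  -- stage 1: counts[score] = counts.get(score, 0) + 1
  let counts : PySem.Dict Int Int :=
    (participant_score_map.map (fun p => p.2)).foldl
      (fun (d : PySem.Dict Int Int) s => d.insert s (d.getD s 0 + 1)) PySem.Dict.empty
  -- stage 2: cumulative position over the distinct scores, descending
  let score_rank : PySem.Dict Int Int :=
    ((PySem.List.sorted counts.keys (fun x => x) true).foldl
      (fun (st : PySem.Dict Int Int × Int) s => (st.1.insert s st.2, st.2 + counts.getD s 0))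
      (PySem.Dict.empty, 1)).1
  -- stage 3: fan out (score_rank[score] ported as getD: every score of `ordered` is a key)
  let ordered := PySem.List.sorted participant_score_map (fun x => x.2) true
  (ordered.foldl (fun (rm : PySem.Dict Int Int) p => rm.insert p.1 (score_rank.getD p.2 0))
    PySem.Dict.empty).items

-- ===== PRECONDITION & SPEC =====
def Spec_compute_rank_map_py (participant_score_map : List (Int × Int)) (out : List (Int × Int)) : Prop := out = compute_rank_map_py_alt participant_score_map
instance (participant_score_map : List (Int × Int)) (out : List (Int × Int)) : Decidable (Spec_compute_rank_map_py participant_score_map out) := by unfold Spec_compute_rank_map_py; infer_instance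

-- ===== CLAIM (what is proved, stated in full; the proofs are below) =====
def Claim_equal_compute_rank_map_py : Prop := ∀ (participant_score_map : List (Int × Int)), Dom_compute_rank_map_py participant_score_map → Spec_compute_rank_map_py participant_score_map (compute_rank_map_py participant_score_map)

-- ===== LEMMAS AND PROOFS =====

-- number of entries of W whose score is strictly greater than v
def cntGt (W : List (Int × Int)) (v : Int) : Nat := W.countP (fun p => v < p.2)

-- the value both loops assign to entry p of the sorted list W
def canonStep (W : List (Int × Int)) (rm : PySem.Dict Int Int) (p : Int × Int) :
    PySem.Dict Int Int := rm.insert p.1 (1 + (cntGt W p.2 : Int))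

-- in a descending list, the first index carrying a score counts the strictly greater scores
theorem cntGt_first (W : List (Int × Int))
    (hp : W.Pairwise (fun a b => b.2 ≤ a.2)) (k : Nat) (hk : k < W.length)
    (hf : ∀ i, (h : i < k) → (W[i]'(lt_trans h hk)).2 ≠ W[k].2) : cntGt W (W[k].2) = k := by
  have hpg := List.pairwise_iff_getElem.mp hp
  have h1 : (W.take k).countP (fun p => W[k].2 < p.2) = (W.take k).length := by
    rw [List.countP_eq_length]
    intro a ha
    obtain ⟨i, hi, rfl⟩ := List.mem_iff_getElem.mp ha
    have hik : i < k := by simp at hi; omega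
    have hik' : i < W.length := lt_trans hik hk
    have hne := hf i hik
    have hle := hpg i k hik' hk hik
    simp only [List.getElem_take]
    exact decide_eq_true (lt_of_le_of_ne hle (fun e => hne e.symm))
  have h2 : (W.drop k).countP (fun p => W[k].2 < p.2) = 0 := by
    rw [List.countP_eq_zero]
    intro a ha
    obtain ⟨i, hi, rfl⟩ := List.mem_iff_getElem.mp ha
    have hki : k + i < W.length := by simp at hi; omega
    have hle : (W[k + i]'hki).2 ≤ W[k].2 := by
      rcases Nat.eq_zero_or_pos i with h0 | h0
      · subst h0; simp
      · exact hpg k (k + i) hk hki (by omega)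
    simp only [List.getElem_drop, decide_eq_true_eq, not_lt]
    exact hle
  have hsplit : W.countP (fun p => W[k].2 < p.2)
      = (W.take k ++ W.drop k).countP (fun p => W[k].2 < p.2) := by
    rw [List.take_append_drop]
  unfold cntGt
  rw [hsplit, List.countP_append, h1, h2, List.length_take]
  omega

-- A's loop, resumed after k elements with its invariant state, computes the canonical fold
-- over the remaining suffix.
theorem foldA_drop (W : List (Int × Int)) (hp : W.Pairwise (fun a b => b.2 ≤ a.2)) :
    ∀ (n k : Nat), n = W.length - k →
    ∀ (rm : PySem.Dict Int Int) (prev : Option Int) (rank : Int),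
    ((k = 0 ∧ prev = none) ∨
      (∃ j, k = j + 1 ∧ ∃ hj : j < W.length,
        prev = some ((W[j]'hj).2) ∧ rank = 1 + (cntGt W ((W[j]'hj).2) : Int))) →
    ((W.drop k).foldl rankStepA (rm, prev, rank, (k : Int))).1
      = (W.drop k).foldl (canonStep W) rm := by
  intro n
  induction n with
  | zero =>
    intro k hn rm prev rank _
    have : W.length ≤ k := by omega
    rw [List.drop_of_length_le this]
    simp
  | succ m ih =>
    intro k hn rm prev rank hinv
    have hk : k < W.length := by omega
    rw [List.drop_eq_getElem_cons hk]
    simp only [List.foldl_cons]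
    have hfirst_of_ne : (some (W[k].2) ≠ prev) → cntGt W (W[k].2) = k := by
      intro hne
      apply cntGt_first W hp k hk
      intro i hik
      rcases hinv with ⟨hk0, _⟩ | ⟨j, hkj, hj, hprev, _⟩
      · omega
      · have hji : i ≤ j := by omega
        have hjne : (W[j]'hj).2 ≠ W[k].2 := by
          intro e; exact hne (by rw [hprev, e])
        rcases eq_or_lt_of_le hji with rfl | hij
        · exact hjne
        · have h1 := (List.pairwise_iff_getElem.mp hp) i j (lt_trans hij hj) hj hij
          have h2 := (List.pairwise_iff_getElem.mp hp) j k hj hk (by omega)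
          have hlt : W[k].2 < (W[i]'(lt_trans hij hj)).2 :=
            lt_of_lt_of_le (lt_of_le_of_ne h2 (fun e => hjne e.symm)) h1
          exact fun e => absurd e.symm (ne_of_lt hlt)
    by_cases hc : some (W[k].2) ≠ prev
    · have hcnt := hfirst_of_ne hc
      have hstep : rankStepA (rm, prev, rank, (k : Int)) W[k]
          = (rm.insert (W[k].1) ((k : Int) + 1), some (W[k].2), (k : Int) + 1, (k : Int) + 1) := by
        simp [rankStepA, hc]
      rw [hstep]
      have hval : (k : Int) + 1 = 1 + (cntGt W (W[k].2) : Int) := by rw [hcnt]; ring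
      have hm : m = W.length - (k + 1) := by clear hinv; omega
      have hih := ih (k + 1) hm (rm.insert (W[k].1) ((k : Int) + 1)) (some (W[k].2))
        ((k : Int) + 1) (Or.inr ⟨k, rfl, hk, rfl, hval⟩)
      rw [show (((k : Nat) + 1 : Nat) : Int) = (k : Int) + 1 by push_cast; ring] at hih
      rw [hih, canonStep, hval]
    · rw [not_ne_iff] at hc
      rcases hinv with ⟨_, hnone⟩ | ⟨j, hkj, hj, hprev, hrank⟩
      · rw [hnone] at hc; exact absurd hc (by simp)
      · have hscore : (W[j]'hj).2 = W[k].2 := by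
          have : some ((W[j]'hj).2) = some (W[k].2) := by rw [← hprev, ← hc]
          exact Option.some_inj.mp this
        have hrank' : rank = 1 + (cntGt W (W[k].2) : Int) := by rw [hrank, hscore]
        have hstep : rankStepA (rm, prev, rank, (k : Int)) W[k]
            = (rm.insert (W[k].1) rank, prev, rank, (k : Int) + 1) := by
          simp only [rankStepA]
          rw [if_neg (by simp [hc])]
        rw [hstep]
        have hm : m = W.length - (k + 1) := by omega
        have hih := ih (k + 1) hm (rm.insert (W[k].1) rank) prev rank
          (Or.inr ⟨k, rfl, hk, by rw [hprev, hscore], hrank'⟩)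
        rw [show (((k : Nat) + 1 : Nat) : Int) = (k : Int) + 1 by push_cast; ring] at hih
        rw [hih, canonStep, hrank']

-- B's cumulative fold never touches a key it does not process
theorem foldB_get?_not_mem (c : Int → Int) :
    ∀ (S : List Int) (d : PySem.Dict Int Int) (pos v : Int), v ∉ S →
    ((S.foldl (fun (st : PySem.Dict Int Int × Int) s => (st.1.insert s st.2, st.2 + c s))
      (d, pos)).1).get? v = d.get? v := by
  intro S
  induction S with
  | nil => intro d pos v _; rfl
  | cons a t ih =>
    intro d pos v hv
    simp only [List.foldl_cons]
    rw [ih _ _ _ (fun h => hv (List.mem_cons_of_mem a h)),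
      PySem.Dict.get?_insert_of_ne _ _ (fun h => hv (by rw [h]; exact List.mem_cons_self))]

-- B's cumulative fold assigns each processed key the start position plus the counts of the
-- strictly greater keys (which, strictly descending, are exactly the earlier ones)
theorem foldB_get?_mem (c : Int → Int) :
    ∀ (S : List Int), S.Pairwise (fun a b => b < a) →
    ∀ (d : PySem.Dict Int Int) (pos v : Int), v ∈ S →
    ((S.foldl (fun (st : PySem.Dict Int Int × Int) s => (st.1.insert s st.2, st.2 + c s))
      (d, pos)).1).get? v
      = some (pos + ((S.filter (fun s => decide (v < s))).map c).sum) := by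
  intro S
  induction S with
  | nil => intro _ d pos v hv; simp at hv
  | cons a t ih =>
    intro hp d pos v hv
    have ha : ∀ b ∈ t, b < a := (List.pairwise_cons.mp hp).1
    simp only [List.foldl_cons]
    by_cases hva : v = a
    · subst hva
      have hvt : v ∉ t := fun h => lt_irrefl v (ha v h)
      rw [foldB_get?_not_mem c t _ _ _ hvt, PySem.Dict.get?_insert_self]
      have hfil : List.filter (fun s => decide (v < s)) (v :: t) = [] := by
        rw [List.filter_cons_of_neg (by simp)]
        rw [List.filter_eq_nil_iff]
        intro b hb
        simp only [decide_eq_true_eq]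
        exact not_lt.mpr (le_of_lt (ha b hb))
      rw [hfil]
      simp
    · have hvt : v ∈ t := (List.mem_cons.mp hv).resolve_left hva
      have hlt : v < a := ha v hvt
      rw [ih (List.pairwise_cons.mp hp).2 _ _ _ hvt,
        List.filter_cons_of_pos (by simpa using hlt)]
      simp only [List.map_cons, List.sum_cons]
      congr 1
      ring

-- summing the multiplicities of the distinct values above v counts the entries above v
theorem sum_count_gt (v : Int) :
    ∀ (vals T : List Int), T.Nodup →
    (∀ x ∈ vals, v < x → x ∈ T) → (∀ s ∈ T, v < s) →
    (T.map (fun s => ((vals.count s : Nat) : Int))).sum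
      = ((vals.countP (fun x => decide (v < x)) : Nat) : Int) := by
  intro vals
  induction vals with
  | nil => intro T _ _ _; simp
  | cons x vs ih =>
    intro T hnd hmem hT
    have hmap : (T.map (fun s => (((x :: vs).count s : Nat) : Int)))
        = T.map (fun s => ((vs.count s : Nat) : Int) + (if (x == s) = true then (1 : Int) else 0)) := by
      refine List.map_congr_left (fun s _ => ?_)
      rw [List.count_cons]
      by_cases h : (x == s) = true <;> simp [h]
    rw [hmap, PySem.List.sum_map_add_int,
      ih T hnd (fun y hy hvy => hmem y (List.mem_cons_of_mem x hy) hvy) hT,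
      PySem.List.sum_map_ite_one_zero]
    have hcc : T.countP (fun s => x == s) = T.count x := by
      have h1 : T.countP (fun s => s == x) = T.count x := Eq.symm List.count_eq_countP
      rw [← h1]
      exact List.countP_congr (fun s _ => by rw [BEq.comm (a := x) (b := s)])
    rw [hcc, List.countP_cons]
    by_cases hvx : v < x
    · rw [List.count_eq_one_of_mem hnd (hmem x List.mem_cons_self hvx)]
      simp [hvx]
    · rw [List.count_eq_zero_of_not_mem (fun h => hvx (hT x h))]
      simp [hvx]

-- ===== VERDICT (by name: the statement is the Claim_ definition above) =====
theorem compute_rank_map_py_spec : Claim_equal_compute_rank_map_py := by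
  intro m _
  unfold Spec_compute_rank_map_py compute_rank_map_py compute_rank_map_py_alt
  simp only []
  set vals := m.map (fun p => p.2) with hvals
  rw [PySem.Dict.foldl_insert_getD_add_one_eq_counter]
  set W := PySem.List.sorted m (fun x => x.2) true with hW
  set K := (PySem.Dict.counter vals).keys with hK
  set S := PySem.List.sorted K (fun x => x) true with hS
  have hpW : W.Pairwise (fun a b => b.2 ≤ a.2) := PySem.List.sorted_pairwise_rev m (fun x => x.2)
  have hndK : K.Nodup := PySem.Dict.nodup_keys_counter vals
  have hndS : S.Nodup := ((PySem.List.sorted_perm K (fun x => x) true).nodup_iff).mpr hndK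
  have hgtS : S.Pairwise (fun a b => b < a) := by
    have hle : S.Pairwise (fun a b => b ≤ a) := PySem.List.sorted_pairwise_rev K (fun x => x)
    exact (hle.and hndS).imp (fun h => lt_of_le_of_ne h.1 (Ne.symm h.2))
  have hmemS : ∀ x : Int, x ∈ vals → x ∈ S := by
    intro x hx
    rw [hS, PySem.List.mem_sorted, hK, PySem.Dict.keys_counter, PySem.Set.mem_ofList]
    exact hx
  have hA : (W.foldl rankStepA (PySem.Dict.empty, none, 0, 0)).1
      = W.foldl (canonStep W) PySem.Dict.empty := by
    have := foldA_drop W hpW W.length 0 (by omega) PySem.Dict.empty none 0 (Or.inl ⟨rfl, rfl⟩)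
    simpa using this
  have hB : W.foldl
      (fun (rm : PySem.Dict Int Int) p => rm.insert p.1
        (((S.foldl (fun (st : PySem.Dict Int Int × Int) s =>
            (st.1.insert s st.2, st.2 + (PySem.Dict.counter vals).getD s 0))
          (PySem.Dict.empty, 1)).1).getD p.2 0))
      PySem.Dict.empty
      = W.foldl (canonStep W) PySem.Dict.empty := by
    apply PySem.List.foldl_congr_mem
    intro acc p hpmem
    have hv_vals : p.2 ∈ vals :=
      List.mem_map_of_mem ((PySem.List.mem_sorted m (fun x => x.2) true p).mp hpmem)
    have hvS : p.2 ∈ S := hmemS p.2 hv_vals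
    rw [PySem.Dict.getD_eq_get?_getD,
      foldB_get?_mem (fun s => (PySem.Dict.counter vals).getD s 0) S hgtS _ _ _ hvS]
    have hmapc : (S.filter (fun s => decide (p.2 < s))).map
        (fun s => (PySem.Dict.counter vals).getD s 0)
        = (S.filter (fun s => decide (p.2 < s))).map
          (fun s => ((vals.count s : Nat) : Int)) :=
      List.map_congr_left (fun s _ => PySem.Dict.getD_counter vals s)
    have hsum := sum_count_gt p.2 vals (S.filter (fun s => decide (p.2 < s)))
      (hndS.filter _)
      (fun x hx hvx => List.mem_filter.mpr ⟨hmemS x hx, by simpa using hvx⟩)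
      (fun s hs => by simpa using (List.mem_filter.mp hs).2)
    have hcnt : (cntGt W p.2 : Int) = ((vals.countP (fun x => decide (p.2 < x)) : Nat) : Int) := by
      unfold cntGt
      have h1 : W.countP (fun q => decide (p.2 < q.2)) = m.countP (fun q => decide (p.2 < q.2)) :=
        List.Perm.countP_eq _ (PySem.List.sorted_perm m (fun x => x.2) true)
      have h2 : vals.countP (fun x => decide (p.2 < x)) = m.countP (fun q => decide (p.2 < q.2)) := by
        rw [hvals, List.countP_map]
        rfl
      rw [h1, h2]
    simp only [Option.getD_some]
    rw [hmapc, hsum]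
    unfold canonStep
    rw [hcnt]
  rw [hA, ← hB]
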